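-- pv_equiv track=rewrite | github.com/PRASHMANE/DSA_IN_LeetCode | 4168-mirror-distance-of-an-integer/mirror-distance-of-an-integer.py | mirrorDistance
-- ===== SOURCE A (Python) =====
-- def mirrorDistance(n: int) -> int:
--     temp = n
--     mirror = 0
--
--     while temp > 0:
--         dig = temp % 10
--         mirror = mirror * 10 + dig
--         temp = temp // 10
--     return abs(mirror - n)
-- ===== SOURCE B (Python) =====
-- def mirrorDistance(n: int) -> int:
--     if n <= 0:
--         return abs(n)
--     k = len(str(n))
--     mirror = sum(n // 10 ** i % 10 * 10 ** (k - 1 - i) for i in range(k))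
--     return abs(mirror - n)
-- ===== Notes on version B (the rewrite author's own statement) =====
-- stated objective: alternative
-- what changed: Replaces A's stateful digit-reversal while-loop with a closed-form sum over digit positions: the digit count comes from len(str(n)) and the mirror is the sum of each extracted digit times its reversed-position power of ten, with no mutable accumulator; for non-positive n the mirror vanishes so the distance is abs(n) directly.
import Mathlib
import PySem

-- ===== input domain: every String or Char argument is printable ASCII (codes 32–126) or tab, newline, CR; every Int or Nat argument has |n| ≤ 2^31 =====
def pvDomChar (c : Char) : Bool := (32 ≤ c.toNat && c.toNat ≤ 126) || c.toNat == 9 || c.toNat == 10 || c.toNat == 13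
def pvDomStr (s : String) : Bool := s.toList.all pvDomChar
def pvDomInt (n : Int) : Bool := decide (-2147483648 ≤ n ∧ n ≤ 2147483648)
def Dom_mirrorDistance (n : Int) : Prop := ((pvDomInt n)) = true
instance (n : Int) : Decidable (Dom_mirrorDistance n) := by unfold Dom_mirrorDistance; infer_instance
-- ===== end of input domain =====

-- B replaces A's stateful digit-reversal while-loop by a closed-form sum over digit positions
-- (digit count from len(str(n))); same value on every int (alternative formulation, not faster).

-- ===== PORT A =====
-- 'while temp > 0: dig = temp % 10; mirror = mirror * 10 + dig; temp = temp // 10'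
def pvLoopA (temp mirror : Int) : Int :=
  if temp > 0 then
    pvLoopA (PySem.Int.floordiv temp 10) (mirror * 10 + PySem.Int.mod temp 10)
  else mirror
termination_by temp.toNat
decreasing_by
  rw [PySem.Int.floordiv_eq_ediv_of_pos (by norm_num)]
  omega

def mirrorDistance (n : Int) : Int := |pvLoopA n 0 - n|

-- ===== PORT B =====
def mirrorDistance_alt (n : Int) : Int :=
  if n ≤ 0 then |n|
  else
    let k := PySem.Str.len (PySem.Int.toStr n)
    let mirror := ((PySem.List.pyRange 0 k).map
      (fun i => PySem.Int.mod (PySem.Int.floordiv n (10 ^ i.toNat)) 10 * 10 ^ (k - 1 - i).toNat)).sum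
    |mirror - n|

-- ===== PRECONDITION & SPEC =====
def Spec_mirrorDistance (n : Int) (out : Int) : Prop := out = mirrorDistance_alt n
instance (n : Int) (out : Int) : Decidable (Spec_mirrorDistance n out) := by unfold Spec_mirrorDistance; infer_instance

-- ===== CLAIM (what is proved, stated in full; the proofs are below) =====
def Claim_equal_mirrorDistance : Prop := ∀ (n : Int), Dom_mirrorDistance n → Spec_mirrorDistance n (mirrorDistance n)

-- ===== LEMMAS AND PROOFS =====

-- A's loop, on a t with exactly K+1 decimal digits, computes acc·10^(K+1) plus the positional sum B uses.
lemma pvLoopA_sum (K : Nat) : ∀ (t acc : Int), 10 ^ K ≤ t → t < 10 ^ (K + 1) →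
    pvLoopA t acc = acc * 10 ^ (K + 1) +
      ((List.range (K + 1)).map
        (fun i => PySem.Int.mod (PySem.Int.floordiv t (10 ^ i)) 10 * 10 ^ (K - i))).sum := by
  induction K with
  | zero =>
    intro t acc h1 h2
    have ht : 0 < t := by simpa using h1
    rw [pvLoopA, if_pos ht]
    have h2' : t < 10 := by simpa using h2
    have h0 : PySem.Int.floordiv t 10 = 0 := by
      rw [PySem.Int.floordiv_eq_ediv_of_pos (by norm_num)]
      omega
    rw [h0, pvLoopA, if_neg (by norm_num)]
    have hf : PySem.Int.floordiv t 1 = t := by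
      rw [PySem.Int.floordiv_eq_ediv_of_pos (by norm_num), Int.ediv_one]
    simp only [zero_add, List.range_one, List.map_cons, List.map_nil, List.sum_cons,
      List.sum_nil, Nat.sub_zero, pow_zero, pow_one, mul_one, add_zero, hf]
  | succ K ih =>
    intro t acc h1 h2
    have ht : 0 < t := lt_of_lt_of_le (pow_pos (by norm_num) _) h1
    rw [pvLoopA, if_pos ht]
    have h1' : (10:Int) ^ K ≤ PySem.Int.floordiv t 10 := by
      rw [PySem.Int.le_floordiv_iff_mul_le (by norm_num)]
      calc (10:Int) ^ K * 10 = 10 ^ (K + 1) := by ring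
        _ ≤ t := h1
    have h2' : PySem.Int.floordiv t 10 < 10 ^ (K + 1) := by
      rw [PySem.Int.floordiv_lt_iff_lt_mul (by norm_num)]
      calc t < 10 ^ (K + 1 + 1) := h2
        _ = 10 ^ (K + 1) * 10 := by ring
    rw [ih _ _ h1' h2']
    conv_rhs => rw [List.range_succ_eq_map, List.map_cons, List.map_map, List.sum_cons]
    have hdiv : ∀ i : Nat,
        PySem.Int.floordiv t (10 ^ (i + 1)) = PySem.Int.floordiv (PySem.Int.floordiv t 10) (10 ^ i) := by
      intro i
      rw [PySem.Int.floordiv_eq_ediv_of_pos (by positivity),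
        PySem.Int.floordiv_eq_ediv_of_pos (by norm_num),
        PySem.Int.floordiv_eq_ediv_of_pos (by positivity),
        Int.ediv_ediv_of_nonneg (by norm_num)]
      congr 1
      ring
    have hmap :
        (List.range (K + 1)).map
            ((fun i => PySem.Int.mod (PySem.Int.floordiv t (10 ^ i)) 10 * 10 ^ (K + 1 - i)) ∘ Nat.succ)
          = (List.range (K + 1)).map
            (fun i => PySem.Int.mod (PySem.Int.floordiv (PySem.Int.floordiv t 10) (10 ^ i)) 10 * 10 ^ (K - i)) := by
      apply List.map_congr_left
      intro i hi
      simp only [Function.comp_apply, Nat.succ_eq_add_one]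
      rw [hdiv i]
      congr 2
      omega
    rw [hmap]
    have hf0 : PySem.Int.floordiv t (10 ^ 0) = t := by
      rw [pow_zero, PySem.Int.floordiv_eq_ediv_of_pos (by norm_num), Int.ediv_one]
    rw [hf0]
    simp only [Nat.sub_zero]
    ring

-- number-of-digits bracket: 10^(k-1) ≤ m < 10^k for k = (Nat.toDigits 10 m).length, m > 0
lemma digits_bracket (m : Nat) (hm : 0 < m) :
    10 ^ ((Nat.toDigits 10 m).length - 1) ≤ m ∧ m < 10 ^ (Nat.toDigits 10 m).length := by
  have hk : 0 < (Nat.toDigits 10 m).length := Nat.length_toDigits_pos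
  constructor
  · by_cases h1 : (Nat.toDigits 10 m).length = 1
    · simpa [h1] using hm
    · by_contra hlt
      have hlt' : m < 10 ^ ((Nat.toDigits 10 m).length - 1) := Nat.lt_of_not_le hlt
      have := (Nat.length_toDigits_le_iff (b := 10) (n := m)
        (k := (Nat.toDigits 10 m).length - 1) (by norm_num) (by omega)).2 hlt'
      omega
  · exact (Nat.length_toDigits_le_iff (by norm_num) hk).1 le_rfl

theorem mirrorDistance_equal (n : Int) : mirrorDistance n = mirrorDistance_alt n := by
  unfold mirrorDistance mirrorDistance_alt
  by_cases hn : n ≤ 0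
  · rw [if_pos hn, pvLoopA, if_neg (by omega)]
    simp
  · rw [if_neg hn]
    have hn' : 0 < n := by omega
    obtain ⟨m, rfl⟩ : ∃ m : Nat, n = (m : Int) := ⟨n.toNat, (Int.toNat_of_nonneg hn'.le).symm⟩
    have hm : 0 < m := by exact_mod_cast hn'
    set k := (Nat.toDigits 10 m).length with hkdef
    have hk : 0 < k := Nat.length_toDigits_pos
    obtain ⟨hlo, hhi⟩ := digits_bracket m hm
    have hlen : PySem.Str.len (PySem.Int.toStr (m : Int)) = (k : Int) := by
      rw [PySem.Str.len_eq, PySem.Int.toList_toStr]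
      have : PySem.Int.toChars (m : Int) = Nat.toDigits 10 m := by
        simp [PySem.Int.toChars, Int.toNat_natCast,
          not_lt_of_ge (by positivity : (0:Int) ≤ (m:Int))]
      rw [this]
    have hloZ : (10:Int) ^ (k - 1) ≤ (m : Int) := by exact_mod_cast hlo
    have hhiZ : ((m : Int)) < 10 ^ k := by exact_mod_cast hhi
    have hk1 : k - 1 + 1 = k := by omega
    have hA := pvLoopA_sum (k - 1) (m : Int) 0 hloZ (by rw [hk1]; exact hhiZ)
    rw [hk1] at hA
    show |pvLoopA (↑m) 0 - ↑m| =
      |((PySem.List.pyRange 0 (PySem.Str.len (PySem.Int.toStr (m : Int)))).map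
        (fun i => PySem.Int.mod (PySem.Int.floordiv (m : Int) (10 ^ i.toNat)) 10 *
          10 ^ ((PySem.Str.len (PySem.Int.toStr (m : Int))) - 1 - i).toNat)).sum - (m : Int)|
    rw [hlen, hA, PySem.List.pyRange_zero_natCast, List.map_map]
    have hmap :
        (List.range k).map
            ((fun i : Int => PySem.Int.mod (PySem.Int.floordiv (m : Int) (10 ^ i.toNat)) 10
                * 10 ^ ((k : Int) - 1 - i).toNat) ∘ (fun j : Nat => (j : Int)))
          = (List.range k).map
            (fun i => PySem.Int.mod (PySem.Int.floordiv (m : Int) (10 ^ i)) 10 * 10 ^ (k - 1 - i)) := by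
      apply List.map_congr_left
      intro j hj
      have hjk : j < k := List.mem_range.mp hj
      simp only [Function.comp_apply, Int.toNat_natCast]
      congr 2
      omega
    rw [hmap, zero_mul, zero_add]

-- ===== VERDICT (by name: the statement is the Claim_ definition above) =====
theorem mirrorDistance_spec : Claim_equal_mirrorDistance := by
  intro n _
  unfold Spec_mirrorDistance
  exact mirrorDistance_equal n
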